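-- pv_equiv track=rewrite | github.com/Natkuma01/CodePath_TIP103 | Unit2/Session2/Version1.py | is_authentic_collection
-- ===== SOURCE A (Python) =====
-- def is_authentic_collection(art_pieces):
--     largest = max(art_pieces)
--     if largest != len(art_pieces) - 1:
--         return False
--     verify = []
--     i = 0
--     while i < len(art_pieces):
--         if art_pieces[i] == largest:
--             art_pieces.remove(art_pieces[i])
--         else:
--             verify.append(art_pieces[i])
--             i += 1
--     return verify == art_pieces
-- ===== SOURCE B (Python) =====
-- def is_authentic_collection(art_pieces):
--     largest = max(art_pieces)
--     if largest != len(art_pieces) - 1: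
--         return False
--     art_pieces[:] = [x for x in art_pieces if x != largest]
--     return True
-- ===== Notes on version B (the rewrite author's own statement) =====
-- stated objective: simpler
-- what changed: B drops A's verify-accumulator and quadratic remove-while-scanning loop plus the final list comparison, and instead filters the list once in place (preserving A's mutation) and returns True directly, since A's loop always leaves verify equal to the filtered list.
import Mathlib
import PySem

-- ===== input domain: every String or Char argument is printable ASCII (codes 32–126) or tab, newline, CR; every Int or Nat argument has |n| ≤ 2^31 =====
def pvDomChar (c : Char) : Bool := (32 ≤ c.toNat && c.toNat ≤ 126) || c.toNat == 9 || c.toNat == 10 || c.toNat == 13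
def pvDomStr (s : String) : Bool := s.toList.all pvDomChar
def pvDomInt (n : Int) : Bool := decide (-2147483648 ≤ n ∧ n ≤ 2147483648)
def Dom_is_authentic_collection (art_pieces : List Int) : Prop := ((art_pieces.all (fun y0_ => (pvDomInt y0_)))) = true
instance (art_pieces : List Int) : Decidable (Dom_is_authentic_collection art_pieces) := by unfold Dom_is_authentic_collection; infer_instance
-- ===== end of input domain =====

-- B: single in-place filter pass and direct True, replacing A's quadratic remove-loop,
-- verify accumulator and final comparison; return-value equivalence proved (both mutate alike in Python).
-- ===== PORT A =====
-- the while-loop of A: state (verify, lst, i); removes lst[i] when it equals largest,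
-- otherwise appends it to verify and advances i; returns verify == lst at the end
def pvLoopA (largest : Int) (verify lst : List Int) (i : Nat) : Bool :=
  if h : i < lst.length then
    if lst[i] == largest then
      match hr : PySem.List.remove? lst lst[i] with
      | some l => pvLoopA largest verify l i
      | none => false  -- unreachable: lst[i] ∈ lst, so remove? never raises
    else
      pvLoopA largest (verify ++ [lst[i]]) lst (i + 1)
  else
    verify == lst
termination_by lst.length - i
decreasing_by
  · have hm : lst[i] ∈ lst := List.getElem_mem h
    rw [PySem.List.remove?_eq_some_erase lst lst[i] hm] at hr
    injection hr with hr'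
    have h1 := List.length_erase_of_mem hm
    rw [hr'] at h1
    have h2 : 0 < lst.length := List.length_pos_of_mem hm
    omega
  · omega

def is_authentic_collection (art_pieces : List Int) : Bool :=
  match PySem.List.max? art_pieces (fun x => x) with
  | none => false  -- unreachable under Pre_: max([]) raises ValueError
  | some largest =>
    if largest != (art_pieces.length : Int) - 1 then false
    else pvLoopA largest [] art_pieces 0

-- ===== PORT B =====
def is_authentic_collection_alt (art_pieces : List Int) : Bool :=
  match PySem.List.max? art_pieces (fun x => x) with
  | none => false  -- unreachable under Pre_: max([]) raises ValueError
  | some largest =>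
    if largest != (art_pieces.length : Int) - 1 then false
    else
      -- art_pieces[:] = [x for x in art_pieces if x != largest]  (in-place mutation; no effect on the return value)
      let _ := art_pieces.filter (fun x => !(x == largest))
      true

-- ===== PRECONDITION & SPEC =====
-- Pre_ excludes exactly the empty list, on which A (max([])) raises ValueError.
def Pre_is_authentic_collection (art_pieces : List Int) : Prop := art_pieces ≠ []
instance (art_pieces : List Int) : Decidable (Pre_is_authentic_collection art_pieces) := by unfold Pre_is_authentic_collection; infer_instance
def pvWitness_is_authentic_collection : List Int := [0, 1, 2]

def Spec_is_authentic_collection (art_pieces : List Int) (out : Bool) : Prop := out = is_authentic_collection_alt art_pieces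
instance (art_pieces : List Int) (out : Bool) : Decidable (Spec_is_authentic_collection art_pieces out) := by unfold Spec_is_authentic_collection; infer_instance

-- ===== CLAIM (what is proved, stated in full; the proofs are below) =====
def Claim_equal_is_authentic_collection : Prop := ∀ (art_pieces : List Int), Dom_is_authentic_collection art_pieces → Pre_is_authentic_collection art_pieces → Spec_is_authentic_collection art_pieces (is_authentic_collection art_pieces)

-- ===== LEMMAS AND PROOFS =====

-- remove? removes the FIRST occurrence: if none of l1 equals v, it removes the v after l1
theorem pv_remove_first {l1 l2 : List Int} {v : Int} (h : v ∉ l1) :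
    PySem.List.remove? (l1 ++ v :: l2) v = some (l1 ++ l2) := by
  induction l1 with
  | nil => simp
  | cons x t ih =>
    have hx : x ≠ v := by intro he; exact h (by simp [he])
    have ht : v ∉ t := fun hm => h (List.mem_cons_of_mem _ hm)
    rw [List.cons_append, PySem.List.remove?_cons_of_ne _ hx, ih ht]
    rfl

-- the loop invariant: with verify = lst.take i and no largest among the first i
-- elements, the loop ends with verify equal to the remaining list
theorem pvLoopA_true (largest : Int) :
    ∀ n (lst : List Int) (i : Nat), lst.length - i ≤ n → largest ∉ lst.take i →
      pvLoopA largest (lst.take i) lst i = true := by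
  intro n
  induction n with
  | zero =>
    intro lst i hn _
    rw [pvLoopA]
    have hge : ¬ i < lst.length := by omega
    simp [hge, List.take_of_length_le (by omega : lst.length ≤ i)]
  | succ m ih =>
    intro lst i hn hv
    rw [pvLoopA]
    split
    · next h =>
      by_cases he : lst[i] = largest
      · have hbeq : (lst[i] == largest) = true := by simp [he]
        rw [if_pos hbeq]
        have hsplit : lst = lst.take i ++ largest :: lst.drop (i + 1) := by
          conv_lhs => rw [← List.take_append_drop i lst]
          congr 1
          rw [List.drop_eq_getElem_cons h, he]
        have hrem : PySem.List.remove? lst lst[i] = some (lst.take i ++ lst.drop (i + 1)) := by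
          rw [he]
          conv_lhs => rw [hsplit]
          exact pv_remove_first hv
        split
        · next l hl =>
          rw [hrem] at hl
          injection hl with hl'
          subst hl'
          have hlen : (lst.take i).length = i := by
            rw [List.length_take]; omega
          have htk : (lst.take i ++ lst.drop (i + 1)).take i = lst.take i := by
            rw [List.take_append_of_le_length (by omega), List.take_take]
            simp
          have hrec := ih (lst.take i ++ lst.drop (i + 1)) i
            (by rw [List.length_append, hlen, List.length_drop]; omega)
            (by rw [htk]; exact hv)
          rw [htk] at hrec
          exact hrec
        · next hl =>
          rw [hrem] at hl
          cases hl
      · have hbeq : (lst[i] == largest) = false := by simp [he]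
        rw [if_neg (by simp [hbeq])]
        have htk : lst.take i ++ [lst[i]] = lst.take (i + 1) := by
          rw [List.take_add_one, List.getElem?_eq_getElem h]
          rfl
        have hv' : largest ∉ lst.take (i + 1) := by
          rw [← htk]
          intro hm
          rcases List.mem_append.mp hm with h1 | h2
          · exact hv h1
          · simp at h2; exact he h2.symm
        rw [htk]
        exact ih lst (i + 1) (by omega) hv'
    · next h =>
      simp [List.take_of_length_le (by omega : lst.length ≤ i)]

-- ===== VERDICT (by name: the statement is the Claim_ definition above) =====
theorem is_authentic_collection_spec : Claim_equal_is_authentic_collection := by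
  intro art_pieces _ _
  unfold Spec_is_authentic_collection is_authentic_collection is_authentic_collection_alt
  cases hmx : PySem.List.max? art_pieces (fun x => x) with
  | none => rfl
  | some largest =>
    by_cases hne : largest = (art_pieces.length : Int) - 1
    · subst hne
      have h0 := pvLoopA_true ((art_pieces.length : Int) - 1) art_pieces.length
        art_pieces 0 (by omega) (by simp)
      simpa using h0
    · simp [hne]
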